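-- pv_equiv track=rewrite | github.com/Bryan-Guner-Backup/DOWN_ARCHIVE_V2 | LAMBDA_LABS/labby-functions/src/teambuilding/handler.py | _calculate_gender_diversity_score
-- ===== SOURCE A (Python) =====
-- from collections import Counter, namedtuple
-- from typing import Dict, List
--
-- SURVEY_GENDER_FIELD = "Gender"
--
-- SURVEY_GENDER_BASE_WEIGHT = 750
--
-- AssignmentTuple = namedtuple("Assignment", ["project", "student", "score"])
--
-- def _calculate_gender_diversity_score(assignments: List[AssignmentTuple], project: dict, student: dict) -> int:
--     """Calculates a score that indicates if this student will complete a gender pair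
--     on the team. This will try to always have at least 2 people who share the same
--     gender identity on the same team.
--
--     Parameters:
--         project -- The project
--         student -- The student
--
--     Returns:
--         A score
--     """
--     # Get the gender specified by the student
--     student_gender = student["fields"].get(SURVEY_GENDER_FIELD, None)
--     if not student_gender:
--         # The student didn't provide a gender, so we can't calculate a score
--         return 0
--
--     # Get the list of current assignments for the project team
--     team_assignments = filter(
--         lambda assignment: assignment.project["fields"]["id"] == project["fields"]["id"], assignments
--     )
--
--     # This list will hold the list of genders on the team
--     team_genders = []
--     for assignment in team_assignments:
--         assigned_student_gender = assignment.student["fields"].get(SURVEY_GENDER_FIELD, None)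
--
--         if assigned_student_gender:
--             team_genders.append(assigned_student_gender)
--
--     # ================================================================================================================
--     # Get the count genders for the already assigned students
--     gender_counter = Counter(team_genders)
--
--     # Get the count of the particular gender that matches the student
--     matching_gender_count = gender_counter.get(student_gender, 0)
--
--     if matching_gender_count == 0:
--         # This is good, as it will make the team more diverse
--         return SURVEY_GENDER_BASE_WEIGHT
--     elif matching_gender_count == 1:
--         # This is better, as it will pair students with like genders
--         return SURVEY_GENDER_BASE_WEIGHT * 2
--     else:
--         # There are already at least 2 student with this gender identity, so we won't
--         # prefer this
--         return 0
-- ===== SOURCE B (Python) =====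
-- SURVEY_GENDER_FIELD = "Gender"
-- SURVEY_GENDER_BASE_WEIGHT = 750
--
--
-- def _first_match_rest(assignments, pid, gender):
--     """Return the list of assignments AFTER the first one on project `pid` whose
--     student reports `gender`, or None if there is no such assignment."""
--     it = iter(assignments)
--     for assignment in it:
--         if assignment.project["fields"]["id"] == pid and \
--                 assignment.student["fields"].get(SURVEY_GENDER_FIELD, None) == gender:
--             return list(it)
--     return None
--
--
-- def _calculate_gender_diversity_score(assignments, project, student):
--     # No gender list, no counter: the score only distinguishes "no match",
--     # "exactly one match" and "two or more", so two staged short-circuit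
--     # searches decide it directly.
--     student_gender = student["fields"].get(SURVEY_GENDER_FIELD, None)
--     if not student_gender:
--         return 0
--
--     pid = project["fields"]["id"]
--
--     rest = _first_match_rest(assignments, pid, student_gender)
--     if rest is None:
--         return SURVEY_GENDER_BASE_WEIGHT
--     if _first_match_rest(rest, pid, student_gender) is None:
--         return SURVEY_GENDER_BASE_WEIGHT * 2
--     return 0
-- ===== Notes on version B (the rewrite author's own statement) =====
-- stated objective: alternative
-- what changed: Instead of collecting all team genders into a list and building a Counter to look up the student's gender count, B never counts anything: it runs a short-circuit search for a first assignment matching (project id, student gender), and if one exists a second search over the remaining suffix, branching on none/one/two matches found.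
-- outside the precondition, e.g. on _calculate_gender_diversity_score([], {}, {'fields': {'Gender': 'f'}}): A returns 750, B raises KeyError
import Mathlib
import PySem

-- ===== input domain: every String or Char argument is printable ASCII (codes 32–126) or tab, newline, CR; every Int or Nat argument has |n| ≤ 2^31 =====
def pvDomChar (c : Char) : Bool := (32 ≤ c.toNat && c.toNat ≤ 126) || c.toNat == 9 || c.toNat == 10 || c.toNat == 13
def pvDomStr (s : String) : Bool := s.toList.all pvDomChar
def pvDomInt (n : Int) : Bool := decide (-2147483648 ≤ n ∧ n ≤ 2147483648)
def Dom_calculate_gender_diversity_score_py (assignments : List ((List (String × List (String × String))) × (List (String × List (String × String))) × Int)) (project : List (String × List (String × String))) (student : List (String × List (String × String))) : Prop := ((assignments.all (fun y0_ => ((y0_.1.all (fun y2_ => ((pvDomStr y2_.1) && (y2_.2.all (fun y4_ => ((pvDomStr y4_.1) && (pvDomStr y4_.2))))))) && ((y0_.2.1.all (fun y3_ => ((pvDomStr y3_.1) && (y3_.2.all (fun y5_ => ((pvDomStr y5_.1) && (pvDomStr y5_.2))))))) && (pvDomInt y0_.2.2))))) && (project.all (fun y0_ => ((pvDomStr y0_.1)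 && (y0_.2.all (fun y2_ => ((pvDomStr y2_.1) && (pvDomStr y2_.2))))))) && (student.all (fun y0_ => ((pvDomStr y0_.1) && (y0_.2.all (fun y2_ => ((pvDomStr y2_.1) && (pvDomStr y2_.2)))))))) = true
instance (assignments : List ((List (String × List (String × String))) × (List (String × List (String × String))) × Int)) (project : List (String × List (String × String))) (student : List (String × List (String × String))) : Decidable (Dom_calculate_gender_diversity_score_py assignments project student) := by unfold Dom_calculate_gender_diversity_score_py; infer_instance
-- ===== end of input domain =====

-- ===== PORT A =====
-- B replaces A's gender list + Counter with two staged short-circuit searches (first match, then a second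
-- match in the remaining suffix) — no count is maintained at all (alternative decomposition, same cost).
-- Shared helpers (dict lookups both Pythons perform):
def pvFields (d : List (String × List (String × String))) : List (String × String) :=
  ((PySem.Dict.mk d).get? "fields").getD []

def pvGender (d : List (String × List (String × String))) : Option String :=
  (PySem.Dict.mk (pvFields d)).get? "Gender"

def pvId (d : List (String × List (String × String))) : String :=
  ((PySem.Dict.mk (pvFields d)).get? "id").getD ""

def calculate_gender_diversity_score_py (assignments : List ((List (String × List (String × String))) × (List (String × List (String × String))) × Int)) (project : List (String × List (String × String))) (student : List (String × List (String × String))) : Int :=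
  match pvGender student with
  | none => 0
  | some g =>
    if g = "" then 0
    else
      -- team_assignments = filter(lambda: assignment.project["fields"]["id"] == project["fields"]["id"])
      let team := assignments.filter (fun x => pvId x.1 == pvId project)
      -- for assignment in team_assignments: append truthy genders
      let team_genders := team.foldl (fun acc x =>
          match pvGender x.2.1 with
          | some ag => if ag ≠ "" then acc ++ [ag] else acc
          | none => acc) ([] : List String)
      -- gender_counter = Counter(team_genders); matching_gender_count = gender_counter.get(student_gender, 0)
      let c : Int := (PySem.Dict.counter team_genders).getD g 0
      if c = 0 then 750 else if c = 1 then 1500 else 0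

-- ===== PORT B =====
-- _first_match_rest: scan for the first assignment matching (pid, gender); return the suffix after it, else None.
def pvFirstMatchRest (pid g : String) : List ((List (String × List (String × String))) × (List (String × List (String × String))) × Int) → Option (List ((List (String × List (String × String))) × (List (String × List (String × String))) × Int))
  | [] => none
  | x :: xs =>
    if pvId x.1 = pid ∧ pvGender x.2.1 = some g then some xs
    else pvFirstMatchRest pid g xs

def calculate_gender_diversity_score_py_alt (assignments : List ((List (String × List (String × String))) × (List (String × List (String × String))) × Int)) (project : List (String × List (String × String))) (student : List (String × List (String × String))) : Int :=
  match pvGender student with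
  | none => 0
  | some g =>
    if g = "" then 0
    else
      let pid := pvId project
      match pvFirstMatchRest pid g assignments with
      | none => 750
      | some rest =>
        match pvFirstMatchRest pid g rest with
        | none => 1500
        | some _ => 0

-- ===== PRECONDITION & SPEC =====
def pvHasFields (d : List (String × List (String × String))) : Prop :=
  ((PySem.Dict.mk d).get? "fields").isSome

def pvGoodProj (d : List (String × List (String × String))) : Prop :=
  pvHasFields d ∧ ((PySem.Dict.mk (pvFields d)).get? "id").isSome

-- Pre_ = exactly where the Python A returns without an exception (student["fields"] present; and, when the
-- student's gender is truthy, project and every assignment's project carry "fields"/"id" and every assignment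
-- on this project carries student "fields"), MINUS one corner it also excludes because the natural B raises
-- where A returns: gender truthy, assignments empty, yet project lacks "fields"/"id" — A never evaluates its
-- lazy filter lambda there and returns 750, while B reads project["fields"]["id"] eagerly and raises KeyError.
def Pre_calculate_gender_diversity_score_py (assignments : List ((List (String × List (String × String))) × (List (String × List (String × String))) × Int)) (project : List (String × List (String × String))) (student : List (String × List (String × String))) : Prop :=
  pvHasFields student ∧
  ((pvGender student).getD "" ≠ "" →
    pvGoodProj project ∧
    ∀ x ∈ assignments, pvGoodProj x.1 ∧ (pvId x.1 = pvId project → pvHasFields x.2.1))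
instance (assignments : List ((List (String × List (String × String))) × (List (String × List (String × String))) × Int)) (project : List (String × List (String × String))) (student : List (String × List (String × String))) : Decidable (Pre_calculate_gender_diversity_score_py assignments project student) := by unfold Pre_calculate_gender_diversity_score_py pvGoodProj pvHasFields; infer_instance

def pvWitness_calculate_gender_diversity_score_py : (List ((List (String × List (String × String))) × (List (String × List (String × String))) × Int)) × (List (String × List (String × String))) × (List (String × List (String × String))) :=
  ([([("fields", [("id", "p")])], [("fields", [("Gender", "f")])], 0)],
   [("fields", [("id", "p")])],
   [("fields", [("Gender", "f")])])

def Spec_calculate_gender_diversity_score_py (assignments : List ((List (String × List (String × String))) × (List (String × List (String × String))) × Int)) (project : List (String × List (String × String))) (student : List (String × List (String × String))) (out : Int) : Prop := out = calculate_gender_diversity_score_py_alt assignments project student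
instance (assignments : List ((List (String × List (String × String))) × (List (String × List (String × String))) × Int)) (project : List (String × List (String × String))) (student : List (String × List (String × String))) (out : Int) : Decidable (Spec_calculate_gender_diversity_score_py assignments project student out) := by unfold Spec_calculate_gender_diversity_score_py; infer_instance

-- ===== CLAIM (what is proved, stated in full; the proofs are below) =====
def Claim_equal_calculate_gender_diversity_score_py : Prop := ∀ (assignments : List ((List (String × List (String × String))) × (List (String × List (String × String))) × Int)) (project : List (String × List (String × String))) (student : List (String × List (String × String))), Dom_calculate_gender_diversity_score_py assignments project student → Pre_calculate_gender_diversity_score_py assignments project student → Spec_calculate_gender_diversity_score_py assignments project student (calculate_gender_diversity_score_py assignments project student)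

-- ===== LEMMAS AND PROOFS =====

-- A's gender list counts g exactly once per team assignment whose student gender is `some g` (g truthy).
theorem pv_count_genders (g : String) (hg : g ≠ "")
    (l : List ((List (String × List (String × String))) × (List (String × List (String × String))) × Int)) :
    ∀ acc : List String,
      (l.foldl (fun acc x =>
          match pvGender x.2.1 with
          | some ag => if ag ≠ "" then acc ++ [ag] else acc
          | none => acc) acc).count g
        = acc.count g + l.countP (fun x => pvGender x.2.1 == some g) := by
  induction l with
  | nil => intro acc; simp
  | cons x xs ih =>
    intro acc
    rw [List.foldl_cons, List.countP_cons]
    cases h : pvGender x.2.1 with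
    | none => rw [ih]; simp
    | some ag =>
      by_cases hag : ag = ""
      · subst hag
        have hne : ("" : String) ≠ g := Ne.symm hg
        rw [ih]; simp [hne]
      · by_cases hgg : ag = g
        · subst hgg
          rw [ih]; simp [hg, List.count_append]; omega
        · rw [ih]; simp [hag, hgg, List.count_append]

-- countP over A's filtered team list = countP of the conjunction B tests in its searches.
theorem pv_countP_filter (pid g : String)
    (l : List ((List (String × List (String × String))) × (List (String × List (String × String))) × Int)) :
    (l.filter (fun x => pvId x.1 == pid)).countP (fun x => pvGender x.2.1 == some g)
      = l.countP (fun x => (pvId x.1 == pid) && (pvGender x.2.1 == some g)) := by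
  rw [List.countP_filter]
  congr 1
  funext a
  exact Bool.and_comm _ _

-- The first search fails exactly when the match count is zero.
theorem pv_fmr_none (pid g : String)
    (l : List ((List (String × List (String × String))) × (List (String × List (String × String))) × Int)) :
    pvFirstMatchRest pid g l = none ↔
      l.countP (fun x => (pvId x.1 == pid) && (pvGender x.2.1 == some g)) = 0 := by
  induction l with
  | nil => simp [pvFirstMatchRest]
  | cons x xs ih =>
    rw [List.countP_cons]
    by_cases h : pvId x.1 = pid ∧ pvGender x.2.1 = some g
    · simp [pvFirstMatchRest, h]
    · have hb : ((pvId x.1 == pid) && (pvGender x.2.1 == some g)) = false := by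
        rcases (not_and_or.mp h) with h' | h' <;> simp [h']
      simp [pvFirstMatchRest, h, hb, ih]

-- A successful first search splits off exactly one match.
theorem pv_fmr_some (pid g : String)
    (l rest : List ((List (String × List (String × String))) × (List (String × List (String × String))) × Int)) :
    pvFirstMatchRest pid g l = some rest →
      l.countP (fun x => (pvId x.1 == pid) && (pvGender x.2.1 == some g))
        = 1 + rest.countP (fun x => (pvId x.1 == pid) && (pvGender x.2.1 == some g)) := by
  induction l with
  | nil => simp [pvFirstMatchRest]
  | cons x xs ih =>
    rw [List.countP_cons]
    by_cases h : pvId x.1 = pid ∧ pvGender x.2.1 = some g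
    · have hb : ((pvId x.1 == pid) && (pvGender x.2.1 == some g)) = true := by
        simp [h.1, h.2]
      simp only [pvFirstMatchRest, if_pos h, Option.some.injEq]
      rintro rfl
      simp [hb]; omega
    · have hb : ((pvId x.1 == pid) && (pvGender x.2.1 == some g)) = false := by
        rcases (not_and_or.mp h) with h' | h' <;> simp [h']
      simp only [pvFirstMatchRest, if_neg h]
      intro hr
      rw [ih hr]; simp [hb]

-- ===== VERDICT (by name: the statement is the Claim_ definition above) =====
theorem calculate_gender_diversity_score_py_spec : Claim_equal_calculate_gender_diversity_score_py := by
  intro assignments project student _hDom _hPre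
  unfold Spec_calculate_gender_diversity_score_py
  unfold calculate_gender_diversity_score_py calculate_gender_diversity_score_py_alt
  cases hG : pvGender student with
  | none => rfl
  | some g =>
    by_cases hg : g = ""
    · simp [hg]
    · simp only [if_neg hg, PySem.Dict.getD_counter]
      rw [pv_count_genders g hg _ [], pv_countP_filter]
      simp only [List.count_nil, Nat.zero_add]
      cases h1 : pvFirstMatchRest (pvId project) g assignments with
      | none =>
        rw [(pv_fmr_none _ _ _).mp h1]
        norm_num
      | some rest =>
        rw [pv_fmr_some _ _ _ _ h1]
        cases h2 : pvFirstMatchRest (pvId project) g rest with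
        | none =>
          rw [(pv_fmr_none _ _ _).mp h2]
          norm_num [h2]
        | some rest2 =>
          rw [pv_fmr_some _ _ _ _ h2]
          have : (1:Int) + (1 + (rest2.countP (fun x => (pvId x.1 == pvId project) && (pvGender x.2.1 == some g)) : Int)) ≠ 0 ∧ (1:Int) + (1 + (rest2.countP (fun x => (pvId x.1 == pvId project) && (pvGender x.2.1 == some g)) : Int)) ≠ 1 := by
            constructor <;> (intro hc; have := Int.natCast_nonneg (rest2.countP (fun x => (pvId x.1 == pvId project) && (pvGender x.2.1 == some g))); omega)
          push_cast
          rw [if_neg this.1, if_neg this.2]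
          simp [h2]
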